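-- pv_equiv track=rewrite | github.com/kimkihyun1/TIL | CodingTest/2308/230807.py | generation
-- ===== SOURCE A (Python) =====
-- def generation(query):
--     n, p = query
--     stack = []
--
--     p -= 1
--     while n > 1:
--         stack.append(p % 4)
--         n -= 1
--         p //= 4
--
--     while stack:
--         num = stack.pop()
--         if num == 0:
--             return 'RR'
--         if num == 3:
--             return 'rr'
--
--     return 'Rr'
-- ===== SOURCE B (Python) =====
-- def generation(query):
--     n, p = query
--     p -= 1
--     res = 'Rr'
--     while n > 1:
--         d = p % 4
--         if d == 0:
--             res = 'RR'
--         elif d == 3: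
--             res = 'rr'
--         n -= 1
--         p //= 4
--     return res
-- ===== Notes on version B (the rewrite author's own statement) =====
-- stated objective: simpler
-- what changed: Drops the stack-then-scan structure: one fused loop keeps a running answer overwritten on each 0/3 digit (last seen = most significant), no list built and no second loop.
import Mathlib
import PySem

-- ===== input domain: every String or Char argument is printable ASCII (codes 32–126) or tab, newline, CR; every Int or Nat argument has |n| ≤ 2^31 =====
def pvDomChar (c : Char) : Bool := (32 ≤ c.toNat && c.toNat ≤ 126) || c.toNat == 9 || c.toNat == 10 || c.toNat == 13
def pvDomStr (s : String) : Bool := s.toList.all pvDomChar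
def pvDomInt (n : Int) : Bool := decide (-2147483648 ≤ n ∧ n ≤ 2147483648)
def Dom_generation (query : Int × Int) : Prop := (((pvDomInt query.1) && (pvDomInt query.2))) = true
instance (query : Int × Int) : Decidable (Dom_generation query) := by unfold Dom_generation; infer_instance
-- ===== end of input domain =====

-- B drops A's build-stack-then-scan structure: one fused loop keeps a running answer
-- overwritten on each 0/3 base-4 digit (simpler, O(1) space instead of a stack).


-- ===== PORT A =====
-- first while loop of A: push p % 4, n -= 1, p //= 4 while n > 1
def genBuildStack (n p : Int) : List Int :=
  if n > 1 then PySem.Int.mod p 4 :: genBuildStack (n - 1) (PySem.Int.floordiv p 4)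
  else []
termination_by n.toNat
decreasing_by omega

-- second while loop of A: pop from the end of the stack, early-return on 0 or 3
def genScan : List Int → String
  | [] => "Rr"
  | num :: rest => if num = 0 then "RR" else if num = 3 then "rr" else genScan rest

def generation (query : Int × Int) : String :=
  genScan (genBuildStack query.1 (query.2 - 1)).reverse

-- ===== PORT B =====
def genLoop (n p : Int) (res : String) : String :=
  if n > 1 then
    let d := PySem.Int.mod p 4
    genLoop (n - 1) (PySem.Int.floordiv p 4)
      (if d = 0 then "RR" else if d = 3 then "rr" else res)
  else res
termination_by n.toNat
decreasing_by omega

def generation_alt (query : Int × Int) : String :=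
  genLoop query.1 (query.2 - 1) "Rr"

-- ===== PRECONDITION & SPEC =====
def Spec_generation (query : Int × Int) (out : String) : Prop := out = generation_alt query
instance (query : Int × Int) (out : String) : Decidable (Spec_generation query out) := by unfold Spec_generation; infer_instance

-- ===== CLAIM (what is proved, stated in full; the proofs are below) =====
def Claim_equal_generation : Prop := ∀ (query : Int × Int), Dom_generation query → Spec_generation query (generation query)

-- ===== LEMMAS AND PROOFS =====
-- scanning with a default accumulator: genScan with base res instead of "Rr"
def genScanD : List Int → String → String
  | [], res => res
  | num :: rest, res => if num = 0 then "RR" else if num = 3 then "rr" else genScanD rest res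

theorem genScan_eq_scanD (l : List Int) : genScan l = genScanD l "Rr" := by
  induction l with
  | nil => rfl
  | cons x rest ih => simp [genScan, genScanD, ih]

theorem genScanD_append_singleton (l : List Int) (x : Int) (res : String) :
    genScanD (l ++ [x]) res
      = genScanD l (if x = 0 then "RR" else if x = 3 then "rr" else res) := by
  induction l generalizing res with
  | nil => rfl
  | cons y rest ih => simp [genScanD, ih]

theorem genLoop_eq_scanD (n p : Int) (res : String) :
    genLoop n p res = genScanD (genBuildStack n p).reverse res := by
  induction n, p using genBuildStack.induct generalizing res with
  | case1 n p h ih =>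
    rw [genLoop, genBuildStack]
    simp only [h, if_pos]
    rw [ih, List.reverse_cons, genScanD_append_singleton]
  | case2 n p h =>
    rw [genLoop, genBuildStack]
    simp [h, genScanD]

-- ===== VERDICT (by name: the statement is the Claim_ definition above) =====
theorem generation_spec : Claim_equal_generation := by
  intro query _
  unfold Spec_generation generation generation_alt
  rw [genLoop_eq_scanD, genScan_eq_scanD]
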